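-- pv_equiv track=rewrite | github.com/Galzi1/github-pr-kb | src/github_pr_kb/generator.py | _parse_article_metadata
-- ===== SOURCE A (Python) =====
-- _FRONTMATTER_DELIMITER = "---"
--
-- def _parse_article_metadata(text: str) -> tuple[dict[str, str] | None, str]:
--     """Parse YAML frontmatter and first # heading from article text."""
--     lines = text.splitlines()
--     if not lines or lines[0].strip() != _FRONTMATTER_DELIMITER:
--         return None, ""
--
--     closing_idx: int | None = None
--     for index, line in enumerate(lines[1:], start=1):
--         if line.strip() == _FRONTMATTER_DELIMITER:
--             closing_idx = index
--             break
--
--     if closing_idx is None: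
--         return None, ""
--
--     fields: dict[str, str] = {}
--     for frontmatter_line in lines[1:closing_idx]:
--         if ":" in frontmatter_line:
--             key, _, value = frontmatter_line.partition(":")
--             fields[key.strip()] = value.strip()
--
--     summary = ""
--     for line in lines[closing_idx + 1:]:
--         if line.startswith("# "):
--             summary = line[2:].strip()
--             break
--
--     return fields, summary
-- ===== SOURCE B (Python) =====
-- _FRONTMATTER_DELIMITER = "---"
--
-- def _parse_article_metadata(text: str) -> tuple[dict[str, str] | None, str]:
--     """Single pass over the lines with an explicit phase variable."""
--     phase = 0  # 0: expecting opening delimiter, 1: inside frontmatter, 2: in body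
--     fields: dict[str, str] = {}
--     summary = ""
--     for line in text.splitlines():
--         if phase == 0:
--             if line.strip() != _FRONTMATTER_DELIMITER:
--                 return None, ""
--             phase = 1
--         elif phase == 1:
--             if line.strip() == _FRONTMATTER_DELIMITER:
--                 phase = 2
--             elif ":" in line:
--                 key, _, value = line.partition(":")
--                 fields[key.strip()] = value.strip()
--         else:
--             if line.startswith("# "):
--                 summary = line[2:].strip()
--                 break
--     if phase != 2:
--         return None, ""
--     return fields, summary
-- ===== Notes on version B (the rewrite author's own statement) =====
-- stated objective: alternative
-- what changed: Replaced A's three separate passes (find closing delimiter, then fold fields over a slice, then scan a slice for the heading) by a single state-machine loop over the lines with an explicit phase variable.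
import Mathlib
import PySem

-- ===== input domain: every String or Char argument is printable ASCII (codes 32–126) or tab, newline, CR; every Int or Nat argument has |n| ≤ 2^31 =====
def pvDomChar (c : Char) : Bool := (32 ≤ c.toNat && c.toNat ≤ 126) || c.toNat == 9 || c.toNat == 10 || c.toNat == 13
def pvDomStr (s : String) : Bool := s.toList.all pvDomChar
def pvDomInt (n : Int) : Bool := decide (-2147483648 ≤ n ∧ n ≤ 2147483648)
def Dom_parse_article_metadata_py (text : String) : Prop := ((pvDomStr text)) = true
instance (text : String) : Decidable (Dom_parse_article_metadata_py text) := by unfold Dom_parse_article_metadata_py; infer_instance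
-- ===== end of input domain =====

-- B replaces A's three sequential passes (delimiter search, fields fold over a slice, heading scan
-- over a slice) by one loop over all lines with an explicit phase variable (alternative decomposition).

-- shared helper: Python's str.partition(sep), exact for a non-empty sep found-or-not
def pyPartition (s sep : String) : String × String × String :=
  let i := PySem.Str.find s sep
  if i < 0 then (s, "", "")
  else (PySem.Str.slice s none (some i), sep,
        PySem.Str.slice s (some (i + PySem.Str.len sep)) none)

-- ===== PORT A =====
-- the 'for index, line in enumerate(lines[1:], start=1)' search for the closing delimiter
def pvFindClose : List String → Nat → Option Nat
  | [], _ => none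
  | l :: ls, i => if PySem.Str.strip l == "---" then some i else pvFindClose ls (i + 1)

-- one iteration of A's fields loop
def pvFieldsStep (d : PySem.Dict String String) (line : String) : PySem.Dict String String :=
  if PySem.Str.isIn ":" line then
    let p := pyPartition line ":"
    d.insert (PySem.Str.strip p.1) (PySem.Str.strip p.2.2)
  else d

-- A's summary loop (break at the first '# ' line)
def pvSummaryA : List String → String
  | [] => ""
  | l :: ls =>
    if PySem.Str.startswith l "# " then PySem.Str.strip (PySem.Str.slice l (some 2) none)
    else pvSummaryA ls

def parse_article_metadata_py (text : String) : (Option (List (String × String))) × String :=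
  let lines := PySem.Str.splitlines text
  match lines with
  | [] => (none, "")
  | l0 :: rest =>
    if PySem.Str.strip l0 != "---" then (none, "")
    else
      match pvFindClose rest 1 with
      | none => (none, "")
      | some c =>
        let fields := (PySem.List.slice lines (some 1) (some (c : Int))).foldl pvFieldsStep PySem.Dict.empty
        let summary := pvSummaryA (PySem.List.slice lines (some ((c : Int) + 1)) none)
        (some fields.items, summary)

-- ===== PORT B =====
-- single loop with phase 0 = expecting opening delimiter, 1 = inside frontmatter, 2 = in body
def pvLoopB : List String → Nat → PySem.Dict String String → String → (Option (List (String × String))) × String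
  | [], ph, fs, sm => if ph == 2 then (some fs.items, sm) else (none, "")
  | l :: ls, ph, fs, sm =>
    if ph == 0 then
      if PySem.Str.strip l != "---" then (none, "") else pvLoopB ls 1 fs sm
    else if ph == 1 then
      if PySem.Str.strip l == "---" then pvLoopB ls 2 fs sm
      else if PySem.Str.isIn ":" l then
        let p := pyPartition l ":"
        pvLoopB ls 1 (fs.insert (PySem.Str.strip p.1) (PySem.Str.strip p.2.2)) sm
      else pvLoopB ls 1 fs sm
    else
      if PySem.Str.startswith l "# " then
        (some fs.items, PySem.Str.strip (PySem.Str.slice l (some 2) none))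
      else pvLoopB ls 2 fs sm

def parse_article_metadata_py_alt (text : String) : (Option (List (String × String))) × String :=
  pvLoopB (PySem.Str.splitlines text) 0 PySem.Dict.empty ""

-- ===== PRECONDITION & SPEC =====
def Spec_parse_article_metadata_py (text : String) (out : (Option (List (String × String))) × String) : Prop := out = parse_article_metadata_py_alt text
instance (text : String) (out : (Option (List (String × String))) × String) : Decidable (Spec_parse_article_metadata_py text out) := by unfold Spec_parse_article_metadata_py; infer_instance

-- ===== CLAIM (what is proved, stated in full; the proofs are below) =====
def Claim_equal_parse_article_metadata_py : Prop := ∀ (text : String), Dom_parse_article_metadata_py text → Spec_parse_article_metadata_py text (parse_article_metadata_py text)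

-- ===== LEMMAS AND PROOFS =====

-- in phase 2 the loop is exactly A's summary scan
lemma pvLoopB_body (ls : List String) (fs : PySem.Dict String String) :
    pvLoopB ls 2 fs "" = (some fs.items, pvSummaryA ls) := by
  induction ls with
  | nil => simp [pvLoopB, pvSummaryA]
  | cons l ls ih =>
    simp only [pvLoopB, pvSummaryA, ih, show ((2 : Nat) == 0) = false from rfl,
      show ((2 : Nat) == 1) = false from rfl, show ((2 : Nat) == 2) = true from rfl,
      Bool.false_eq_true, ite_false, ite_true]
    split <;> rfl

-- the index accumulator of A's closing-delimiter search only shifts the result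
lemma pvFindClose_shift (ls : List String) (k : Nat) :
    pvFindClose ls k = (pvFindClose ls 0).map (k + ·) := by
  induction ls generalizing k with
  | nil => simp [pvFindClose]
  | cons l ls ih =>
    by_cases h : PySem.Str.strip l == "---"
    · simp [pvFindClose, h]
    · simp only [pvFindClose, h, if_neg, Bool.false_eq_true, ite_false]
      rw [ih (k + 1), ih 1, Option.map_map]
      cases pvFindClose ls 0 <;> simp <;> try omega

-- in phase 1 the loop computes A's closing search, fields fold and summary scan at once
lemma pvLoopB_front (rest : List String) (fs : PySem.Dict String String) :
    pvLoopB rest 1 fs "" =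
      match pvFindClose rest 0 with
      | none => (none, "")
      | some j => (some ((rest.take j).foldl pvFieldsStep fs).items, pvSummaryA (rest.drop (j + 1))) := by
  induction rest generalizing fs with
  | nil => simp [pvLoopB, pvFindClose]

  | cons l ls ih =>
    by_cases h : PySem.Str.strip l == "---"
    · simp only [pvLoopB, pvFindClose, h, show ((1 : Nat) == 0) = false from rfl,
        show ((1 : Nat) == 1) = true from rfl, Bool.false_eq_true, ite_false, ite_true,
        pvLoopB_body]
      simp
    · have hstep : pvLoopB (l :: ls) 1 fs "" = pvLoopB ls 1 (pvFieldsStep fs l) "" := by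
        simp only [pvLoopB, pvFieldsStep, h, show ((1 : Nat) == 0) = false from rfl,
          show ((1 : Nat) == 1) = true from rfl, Bool.false_eq_true, ite_false, ite_true]
        split <;> rfl
      rw [hstep, ih]
      simp only [pvFindClose, h, Bool.false_eq_true, ite_false, pvFindClose_shift ls 1]
      cases pvFindClose ls 0 with
      | none => simp
      | some j =>
        simp only [Option.map_some]
        have h1 : 1 + j = j + 1 := by omega
        simp [h1, List.foldl_cons, pvFieldsStep]

-- ===== VERDICT (by name: the statement is the Claim_ definition above) =====
theorem parse_article_metadata_py_spec : Claim_equal_parse_article_metadata_py := by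
  intro text _
  unfold Spec_parse_article_metadata_py parse_article_metadata_py parse_article_metadata_py_alt
  cases hls : PySem.Str.splitlines text with
  | nil => simp [pvLoopB]
  | cons l0 rest =>
    by_cases h0 : PySem.Str.strip l0 != "---"
    · simp [pvLoopB, h0]
    · have h0' : (PySem.Str.strip l0 == "---") = true := by
        simpa using h0
      simp only [h0, Bool.false_eq_true, ite_false, pvLoopB, h0', ite_true,
        show ((0 : Nat) == 0) = true from rfl]
      rw [pvLoopB_front, pvFindClose_shift rest 1]
      cases hF : pvFindClose rest 0 with
      | none => simp
      | some j =>
        simp only [Option.map_some]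
        have hsl1 : PySem.List.slice (l0 :: rest) (some ((1 + j : Nat) : Int)) none = (l0 :: rest).drop (1 + j) :=
          PySem.List.slice_from_natCast _ _
        have hsl2 : PySem.List.slice (l0 :: rest) (some (1 : Int)) (some ((1 + j : Nat) : Int)) = ((l0 :: rest).drop 1).take ((1 + j) - 1) := by
          have := PySem.List.slice_natCast (l0 :: rest) 1 (1 + j)
          simpa using this
        have hc1 : ((1 + j : Nat) : Int) + 1 = (((1 + j) + 1 : Nat) : Int) := by push_cast; ring
        simp only [hc1]
        rw [PySem.List.slice_from_natCast, hsl2]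
        have h2 : (1 + j) - 1 = j := by omega
        have h3 : (1 + j) + 1 = j + 1 + 1 := by omega
        simp [h2, h3]
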